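-- pv_equiv track=rewrite | github.com/pranitafarsole6/UrbanbyteAI | backend/app/services/duplicate_service.py | find_drive_duplicates
-- ===== SOURCE A (Python) =====
-- def find_drive_duplicates(files):
--     hashes = {}
--     duplicates = []
--
--     for f in files:
--         h = f.get("md5Checksum")
--         if h:
--             if h in hashes:
--                 duplicates.append(f)
--             else:
--                 hashes[h] = f
--
--     return duplicates
-- ===== SOURCE B (Python) =====
-- def find_drive_duplicates(files):
--     first = {}
--     for i, f in enumerate(files):
--         h = f.get("md5Checksum")
--         if h and h not in first:
--             first[h] = i
--     return [f for i, f in enumerate(files)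
--             if f.get("md5Checksum") and first[f.get("md5Checksum")] != i]
-- ===== Notes on version B (the rewrite author's own statement) =====
-- stated objective: alternative
-- what changed: B replaces A's single combined seen-dict-and-collect pass with two passes: first build a dict mapping each truthy checksum to its first-occurrence index, then filter enumerate(files) keeping files whose index differs from that first occurrence.
import Mathlib
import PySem

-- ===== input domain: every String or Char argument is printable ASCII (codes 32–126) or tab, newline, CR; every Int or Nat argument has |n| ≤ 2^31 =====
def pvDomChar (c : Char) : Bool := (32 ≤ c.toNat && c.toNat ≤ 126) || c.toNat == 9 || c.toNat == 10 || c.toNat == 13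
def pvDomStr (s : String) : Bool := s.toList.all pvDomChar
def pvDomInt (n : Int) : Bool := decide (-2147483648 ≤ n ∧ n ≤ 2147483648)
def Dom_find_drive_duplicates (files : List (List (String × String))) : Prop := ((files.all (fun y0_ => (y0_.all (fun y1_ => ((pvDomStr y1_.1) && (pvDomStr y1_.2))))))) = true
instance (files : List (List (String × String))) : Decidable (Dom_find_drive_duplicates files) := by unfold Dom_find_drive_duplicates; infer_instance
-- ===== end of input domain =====

-- B re-implements A's combined seen-dict-and-collect single pass as two passes
-- (first-occurrence-index dict, then an index-comparing filter over enumerate);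
-- same cost, alternative decomposition.

-- f.get("md5Checksum") on the record f (an assoc-list dict; first match), used by both ports
def ckOf (f : List (String × String)) : Option String :=
  PySem.Dict.get? (PySem.Dict.mk f) "md5Checksum"

-- ===== PORT A =====
-- loop body of A's single pass (state = (hashes, duplicates))
def stepA (st : PySem.Dict String (List (String × String)) × List (List (String × String)))
    (f : List (String × String)) :
    PySem.Dict String (List (String × String)) × List (List (String × String)) :=
  match ckOf f with
  | some h =>
    if h ≠ "" then
      if st.1.contains h then (st.1, st.2 ++ [f]) else (st.1.insert h f, st.2)
    else st
  | none => st

def find_drive_duplicates (files : List (List (String × String))) : List (List (String × String)) :=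
  (files.foldl stepA (PySem.Dict.empty, [])).2

-- ===== PORT B =====
-- first pass: record the index of the first occurrence of each truthy checksum
def stepB (d : PySem.Dict String Int) (p : Int × List (String × String)) : PySem.Dict String Int :=
  match ckOf p.2 with
  | some h => if h ≠ "" ∧ d.contains h = false then d.insert h p.1 else d
  | none => d

def find_drive_duplicates_alt (files : List (List (String × String))) : List (List (String × String)) :=
  let first : PySem.Dict String Int :=
    (PySem.List.enumerate files).foldl stepB PySem.Dict.empty
  ((PySem.List.enumerate files).filter (fun p =>
      match ckOf p.2 with
      | some h => decide (h ≠ "" ∧ first.get? h ≠ some p.1)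
      | none => false)).map (·.2)

-- ===== PRECONDITION & SPEC =====
def Spec_find_drive_duplicates (files : List (List (String × String))) (out : List (List (String × String))) : Prop := out = find_drive_duplicates_alt files
instance (files : List (List (String × String))) (out : List (List (String × String))) : Decidable (Spec_find_drive_duplicates files out) := by unfold Spec_find_drive_duplicates; infer_instance

-- ===== CLAIM (what is proved, stated in full; the proofs are below) =====
def Claim_equal_find_drive_duplicates : Prop := ∀ (files : List (List (String × String))), Dom_find_drive_duplicates files → Spec_find_drive_duplicates files (find_drive_duplicates files)

-- ===== LEMMAS AND PROOFS =====

-- truthy checksum of a record (None and "" are both falsy)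
def ckT (f : List (String × String)) : Option String :=
  match ckOf f with
  | some h => if h ≠ "" then some h else none
  | none => none

-- reference recursion: collect later occurrences, carrying the set of seen checksums
def refGo (seen : List String) : List (List (String × String)) → List (List (String × String))
  | [] => []
  | f :: fs =>
    match ckT f with
    | some h => if h ∈ seen then f :: refGo seen fs else refGo (h :: seen) fs
    | none => refGo seen fs

-- index (counting from k) of the first truthy occurrence of checksum s
def fIdx (s : String) (k : Int) : List (List (String × String)) → Option Int
  | [] => none
  | f :: fs =>
    match ckT f with
    | some h => if h = s then some k else fIdx s (k + 1) fs
    | none => fIdx s (k + 1) fs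

def seenOf (pre : List (List (String × String))) : List String := pre.filterMap ckT

theorem refGo_congr (fs : List (List (String × String))) (s1 s2 : List String)
    (h : ∀ x, x ∈ s1 ↔ x ∈ s2) : refGo s1 fs = refGo s2 fs := by
  induction fs generalizing s1 s2 with
  | nil => rfl
  | cons f fs ih =>
    simp only [refGo]
    cases hc : ckT f with
    | none => exact ih s1 s2 h
    | some c =>
      dsimp only
      by_cases hm : c ∈ s1
      · rw [if_pos hm, if_pos ((h c).mp hm), ih s1 s2 h]
      · rw [if_neg hm, if_neg (fun hx => hm ((h c).mpr hx))]
        exact ih _ _ (by intro x; simp [List.mem_cons, h x])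

theorem foldA_eq_refGo (fs : List (List (String × String)))
    (d : PySem.Dict String (List (String × String))) (acc : List (List (String × String)))
    (seen : List String) (hinv : ∀ h, d.contains h = decide (h ∈ seen)) :
    (fs.foldl stepA (d, acc)).2 = acc ++ refGo seen fs := by
  induction fs generalizing d acc seen with
  | nil => simp [refGo]
  | cons f fs ih =>
    simp only [List.foldl_cons, refGo]
    cases hc : ckOf f with
    | none =>
      have hT : ckT f = none := by simp [ckT, hc]
      rw [hT]
      have : stepA (d, acc) f = (d, acc) := by simp [stepA, hc]
      rw [this]; exact ih d acc seen hinv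
    | some h =>
      by_cases hE : h = ""
      · have hT : ckT f = none := by simp [ckT, hc, hE]
        rw [hT]
        have : stepA (d, acc) f = (d, acc) := by simp [stepA, hc, hE]
        rw [this]; exact ih d acc seen hinv
      · have hT : ckT f = some h := by simp [ckT, hc, hE]
        rw [hT]
        dsimp only
        by_cases hm : h ∈ seen
        · have hcon : d.contains h = true := by rw [hinv]; simp [hm]
          have : stepA (d, acc) f = (d, acc ++ [f]) := by simp [stepA, hc, hE, hcon]
          rw [this, if_pos hm, ih d (acc ++ [f]) seen hinv, List.append_assoc]
          rfl
        · have hcon : d.contains h = false := by rw [hinv]; simp [hm]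
          have : stepA (d, acc) f = (d.insert h f, acc) := by simp [stepA, hc, hE, hcon]
          rw [this, if_neg hm]
          refine ih _ acc (h :: seen) ?_
          intro h'
          by_cases hh : h' = h
          · subst hh; simp [PySem.Dict.contains_insert_self]
          · rw [PySem.Dict.contains_insert, hinv]
            simp [List.mem_cons, hh]

theorem foldB_get? (fs : List (List (String × String))) (k : Int) (d : PySem.Dict String Int)
    (s : String) :
    ((PySem.List.enumerate fs k).foldl stepB d).get? s =
      (match d.get? s with
       | some v => some v
       | none => fIdx s k fs) := by
  induction fs generalizing k d with
  | nil =>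
    simp only [PySem.List.enumerate_nil, List.foldl_nil, fIdx]
    cases d.get? s <;> rfl
  | cons f fs ih =>
    rw [PySem.List.enumerate_cons, List.foldl_cons]
    cases hc : ckOf f with
    | none =>
      have hT : ckT f = none := by simp [ckT, hc]
      have hs : stepB d (k, f) = d := by simp [stepB, hc]
      rw [hs, ih, fIdx, hT]
    | some h =>
      by_cases hE : h = ""
      · have hT : ckT f = none := by simp [ckT, hc, hE]
        have hs : stepB d (k, f) = d := by simp [stepB, hc, hE]
        rw [hs, ih, fIdx, hT]
      · have hT : ckT f = some h := by simp [ckT, hc, hE]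
        cases hcon : d.contains h with
        | true =>
          have hs : stepB d (k, f) = d := by simp [stepB, hc, hcon]
          rw [hs, ih, fIdx, hT]
          dsimp only
          cases hd : d.get? s with
          | some v => rfl
          | none =>
            have hne : h ≠ s := by
              intro he; subst he
              rw [PySem.Dict.contains_eq_isSome_get?, hd] at hcon; simp at hcon
            simp [hne]
        | false =>
          have hs : stepB d (k, f) = d.insert h k := by simp [stepB, hc, hE, hcon]
          rw [hs, ih, fIdx, hT]
          dsimp only
          by_cases hsh : s = h
          · subst hsh
            have hd : d.get? s = none := by
              cases hd : d.get? s with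
              | none => rfl
              | some v =>
                rw [PySem.Dict.contains_eq_isSome_get?, hd] at hcon; simp at hcon
            rw [PySem.Dict.get?_insert_self, hd]
            simp
          · rw [PySem.Dict.get?_insert_of_ne _ _ hsh]
            have : ¬ (h = s) := fun he => hsh he.symm
            simp [this]

theorem fIdx_bounds (s : String) (fs : List (List (String × String))) (k j : Int)
    (h : fIdx s k fs = some j) : k ≤ j ∧ j < k + fs.length := by
  induction fs generalizing k with
  | nil => simp [fIdx] at h
  | cons f fs ih =>
    rw [fIdx] at h
    cases hc : ckT f with
    | none =>
      rw [hc] at h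
      have := ih (k + 1) h
      simp only [List.length_cons]
      push_cast
      omega
    | some c =>
      rw [hc] at h
      dsimp only at h
      by_cases hcs : c = s
      · rw [if_pos hcs] at h
        injection h with h; subst h
        simp only [List.length_cons]
        push_cast
        omega
      · rw [if_neg hcs] at h
        have := ih (k + 1) h
        simp only [List.length_cons]
        push_cast
        omega

theorem fIdx_none_iff (s : String) (fs : List (List (String × String))) (k : Int) :
    fIdx s k fs = none ↔ s ∉ seenOf fs := by
  induction fs generalizing k with
  | nil => simp [fIdx, seenOf]
  | cons f fs ih =>
    rw [fIdx]
    cases hc : ckT f with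
    | none => simp [seenOf, hc, ih (k + 1)]
    | some c =>
      dsimp only
      by_cases hcs : c = s
      · subst hcs
        simp [seenOf, hc]
      · rw [if_neg hcs]
        simp [seenOf, hc, ih (k + 1), Ne.symm hcs]

theorem fIdx_append (s : String) (xs ys : List (List (String × String))) (k : Int) :
    fIdx s k (xs ++ ys) =
      (match fIdx s k xs with
       | some j => some j
       | none => fIdx s (k + xs.length) ys) := by
  induction xs generalizing k with
  | nil => simp [fIdx]
  | cons x xs ih =>
    rw [List.cons_append, fIdx, fIdx]
    cases hc : ckT x with
    | none =>
      dsimp only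
      rw [ih (k + 1)]
      have he : k + 1 + (xs.length : Int) = k + (x :: xs).length := by
        simp only [List.length_cons]; push_cast; ring
      rw [he]
    | some c =>
      by_cases hcs : c = s
      · simp [hcs]
      · dsimp only
        rw [if_neg hcs, if_neg hcs, ih (k + 1)]
        have he : k + 1 + (xs.length : Int) = k + (x :: xs).length := by
          simp only [List.length_cons]; push_cast; ring
        rw [he]

theorem filterB_eq_refGo (fs pre : List (List (String × String))) :
    ((PySem.List.enumerate fs (pre.length : Int)).filter (fun p =>
        match ckOf p.2 with
        | some h => decide (h ≠ "" ∧ fIdx h 0 (pre ++ fs) ≠ some p.1)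
        | none => false)).map (·.2) = refGo (seenOf pre) fs := by
  induction fs generalizing pre with
  | nil => simp [PySem.List.enumerate_nil, refGo]
  | cons f fs ih =>
    have hlen : ((pre ++ [f]).length : Int) = (pre.length : Int) + 1 := by
      simp [List.length_append]
    have hassoc : pre ++ f :: fs = (pre ++ [f]) ++ fs := by simp
    have htail := ih (pre ++ [f])
    rw [hlen, ← hassoc] at htail
    rw [PySem.List.enumerate_cons, List.filter_cons]
    cases hc : ckOf f with
    | none =>
      have hT : ckT f = none := by simp [ckT, hc]
      have hseen : seenOf (pre ++ [f]) = seenOf pre := by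
        simp [seenOf, List.filterMap_append, hT]
      rw [hseen] at htail
      simp only [refGo, hT]
      rw [if_neg (by simp)]
      exact htail
    | some h =>
      by_cases hE : h = ""
      · have hT : ckT f = none := by simp [ckT, hc, hE]
        have hseen : seenOf (pre ++ [f]) = seenOf pre := by
          simp [seenOf, List.filterMap_append, hT]
        rw [hseen] at htail
        simp only [refGo, hT]
        rw [if_neg (by simp [hE])]
        exact htail
      · have hT : ckT f = some h := by simp [ckT, hc, hE]
        have hseen : seenOf (pre ++ [f]) = seenOf pre ++ [h] := by
          simp [seenOf, List.filterMap_append, hT]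
        rw [hseen] at htail
        have hsplit := fIdx_append h pre (f :: fs) 0
        have hhead : fIdx h (0 + (pre.length : Int)) (f :: fs) = some (pre.length : Int) := by
          rw [fIdx, hT]; simp
        simp only [refGo, hT]
        by_cases hm : h ∈ seenOf pre
        · -- seen before: fIdx h 0 pre = some j with j < pre.length, so the filter keeps f
          have hnn : fIdx h 0 pre ≠ none := by
            intro hn
            exact absurd hm ((fIdx_none_iff h pre 0).mp hn)
          obtain ⟨j, hj⟩ := Option.ne_none_iff_exists'.mp hnn
          have hb := fIdx_bounds h pre 0 j hj
          have hcond : fIdx h 0 (pre ++ f :: fs) = some j := by rw [hsplit, hj]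
          rw [if_pos (by simp [hcond, hE]; omega)]
          rw [if_pos hm, List.map_cons]
          rw [refGo_congr fs (seenOf pre ++ [h]) (seenOf pre)
            (by intro x; simp [List.mem_append]; intro hx; subst hx; exact hm)] at htail
          rw [htail]
        · -- first occurrence: fIdx over the whole list is exactly this index, filter drops f
          have hnone : fIdx h 0 pre = none := by rw [fIdx_none_iff]; simpa using hm
          have hcond : fIdx h 0 (pre ++ f :: fs) = some (pre.length : Int) := by
            rw [hsplit, hnone, hhead]
          rw [if_neg (by simp [hcond, hE])]
          rw [if_neg hm]
          rw [refGo_congr fs (seenOf pre ++ [h]) (h :: seenOf pre)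
            (by intro x; simp [List.mem_append, List.mem_cons, or_comm])] at htail
          exact htail

-- ===== VERDICT (by name: the statement is the Claim_ definition above) =====
theorem find_drive_duplicates_spec : Claim_equal_find_drive_duplicates := by
  intro files _
  show find_drive_duplicates files = find_drive_duplicates_alt files
  have hA : find_drive_duplicates files = refGo [] files := by
    unfold find_drive_duplicates
    rw [foldA_eq_refGo files PySem.Dict.empty [] [] (by intro h; simp)]
    rfl
  have hfull : ∀ s, ((PySem.List.enumerate files).foldl stepB PySem.Dict.empty).get? s
      = fIdx s 0 files := by
    intro s
    rw [show PySem.List.enumerate files = PySem.List.enumerate files 0 from rfl]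
    rw [foldB_get? files 0 PySem.Dict.empty s]
    simp
  have hB : find_drive_duplicates_alt files = refGo [] files := by
    unfold find_drive_duplicates_alt
    dsimp only
    have hfun : (fun (p : Int × List (String × String)) =>
        match ckOf p.2 with
        | some h => decide (h ≠ "" ∧ ((PySem.List.enumerate files).foldl stepB PySem.Dict.empty).get? h ≠ some p.1)
        | none => false)
      = (fun (p : Int × List (String × String)) =>
        match ckOf p.2 with
        | some h => decide (h ≠ "" ∧ fIdx h 0 files ≠ some p.1)
        | none => false) := by
      funext p
      cases ckOf p.2 with
      | none => rfl
      | some h => dsimp only; rw [hfull h]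
    rw [hfun]
    have := filterB_eq_refGo files []
    simpa [seenOf] using this
  rw [hA, hB]
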